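-- pv_equiv track=rewrite | github.com/mohfy/quizbite | src/ui/utils/pdfgenerator.py | _build_options_layout_markup
-- ===== SOURCE A (Python) =====
-- OPTION_GRID_MAX_CHARS = 28
--
-- def _build_options_layout_markup(
--     option_markup: list[str],
--     option_texts: list[str],
-- ) -> str:
--     """Choose list or two-column layout for options."""
--     if not _should_use_option_grid(option_texts):
--         return """
--         <div class="options-list">
--           {options}
--         </div>
--         """.format(options="".join(option_markup))
--
--     grid_rows = []
--     for option_index in range(0, len(option_markup), 2):
--         row_markup = option_markup[option_index : option_index + 2]
--         cells = [
--             '<div class="option-cell">{option}</div>'.format(option=cell_markup)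
--             for cell_markup in row_markup
--         ]
--         if len(cells) == 1:
--             cells.append('<div class="option-cell option-cell-empty"></div>')
--
--         grid_rows.append(
--             """
--             <div class="options-grid-row">
--               {cells}
--             </div>
--             """.format(cells="".join(cells))
--         )
--
--     return """
--     <div class="options-list">
--       {rows}
--     </div>
--     """.format(rows="".join(grid_rows))
--
-- def _should_use_option_grid(option_texts: list[str]) -> bool:
--     """Return True if options fit well in a two-column grid."""
--     return all(_option_is_short(option_text) for option_text in option_texts)
--
-- def _option_is_short(option_text: str) -> bool:
--     """Heuristic for short, single-line option text."""
--     normalized_text = " ".join(option_text.split())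
--     return (
--         bool(normalized_text)
--         and "\n" not in option_text
--         and len(normalized_text) <= OPTION_GRID_MAX_CHARS
--     )
-- ===== SOURCE B (Python) =====
-- OPTION_GRID_MAX_CHARS = 28
--
-- _LIST_TEMPLATE = """
--         <div class="options-list">
--           {options}
--         </div>
--         """
--
-- _ROW_TEMPLATE = """
--             <div class="options-grid-row">
--               {cells}
--             </div>
--             """
--
-- _GRID_TEMPLATE = """
--     <div class="options-list">
--       {rows}
--     </div>
--     """
--
--
-- def _build_options_layout_markup(
--     option_markup: list[str],
--     option_texts: list[str],
-- ) -> str: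
--     """Choose list or two-column layout for options."""
--     if not _should_use_option_grid(option_texts):
--         return _LIST_TEMPLATE.format(options="".join(option_markup))
--
--     # Pass 1: build the complete flat list of cells, padding to even length.
--     cells = ['<div class="option-cell">{}</div>'.format(markup) for markup in option_markup]
--     if len(cells) % 2 == 1:
--         cells.append('<div class="option-cell option-cell-empty"></div>')
--
--     # Pass 2: chunk the flat cell list into consecutive pairs and render rows.
--     it = iter(cells)
--     rows = "".join(_ROW_TEMPLATE.format(cells=left + right) for left, right in zip(it, it))
--     return _GRID_TEMPLATE.format(rows=rows)
--
--
-- def _should_use_option_grid(option_texts: list[str]) -> bool: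
--     """Return True if options fit well in a two-column grid."""
--     return all(_option_is_short(option_text) for option_text in option_texts)
--
--
-- def _option_is_short(option_text: str) -> bool:
--     """Heuristic for short, single-line option text."""
--     normalized_text = " ".join(option_text.split())
--     return (
--         bool(normalized_text)
--         and "\n" not in option_text
--         and len(normalized_text) <= OPTION_GRID_MAX_CHARS
--     )
-- ===== Notes on version B (the rewrite author's own statement) =====
-- stated objective: alternative
-- what changed: Instead of looping over even indices and slicing the input per row, B first builds the complete flat list of wrapped cell divs in one comprehension, pads it once to even length with the empty-cell filler, and then chunks it into consecutive pairs via zip(it, it) to render the rows.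
import Mathlib
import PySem

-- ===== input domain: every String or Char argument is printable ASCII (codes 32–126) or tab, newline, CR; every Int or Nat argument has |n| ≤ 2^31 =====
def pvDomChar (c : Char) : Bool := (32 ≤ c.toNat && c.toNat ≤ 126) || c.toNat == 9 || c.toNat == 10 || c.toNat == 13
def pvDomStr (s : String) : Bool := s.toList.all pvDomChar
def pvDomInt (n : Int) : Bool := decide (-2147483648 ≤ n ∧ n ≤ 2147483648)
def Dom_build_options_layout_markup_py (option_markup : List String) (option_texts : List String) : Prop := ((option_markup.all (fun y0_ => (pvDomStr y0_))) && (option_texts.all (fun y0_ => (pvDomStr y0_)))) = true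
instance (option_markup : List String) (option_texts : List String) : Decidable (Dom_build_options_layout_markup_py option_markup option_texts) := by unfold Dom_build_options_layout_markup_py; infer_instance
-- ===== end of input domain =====

-- B differs from A only in decomposition: it builds the flat list of option cells in one
-- pass, pads it to even length once, then chunks it into pairs (A instead loops over even
-- indices slicing the input and padding per-row).  Objective: alternative decomposition,
-- identical cost; the return value is proved identical on the whole domain.

-- ===== PORT A =====
-- shared helpers (identical in Source A and Source B)
def option_is_short_py (option_text : String) : Bool :=
  let normalized_text := PySem.Str.join " " (PySem.Str.split₀ option_text)
  decide (PySem.Str.len normalized_text ≠ 0)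
    && !(PySem.Str.isIn "\n" option_text)
    && decide (PySem.Str.len normalized_text ≤ 28)

def should_use_option_grid_py (option_texts : List String) : Bool :=
  option_texts.all option_is_short_py

def build_options_layout_markup_py (option_markup : List String) (option_texts : List String) : String :=
  if !(should_use_option_grid_py option_texts) then
    "\n        <div class=\"options-list\">\n          "
      ++ PySem.Str.join "" option_markup
      ++ "\n        </div>\n        "
  else
    let grid_rows := (PySem.List.pyRange 0 (option_markup.length : Int) 2).foldl
      (fun acc option_index =>
        let row_markup := PySem.List.slice option_markup (some option_index) (some (option_index + 2))
        let cells := row_markup.map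
          (fun cell_markup => "<div class=\"option-cell\">" ++ cell_markup ++ "</div>")
        let cells := if cells.length == 1
          then cells ++ ["<div class=\"option-cell option-cell-empty\"></div>"]
          else cells
        acc ++ ["\n            <div class=\"options-grid-row\">\n              "
                 ++ PySem.Str.join "" cells
                 ++ "\n            </div>\n            "]) []
    "\n    <div class=\"options-list\">\n      "
      ++ PySem.Str.join "" grid_rows
      ++ "\n    </div>\n    "

-- ===== PORT B =====
-- zip(it, it) on the (even-length) cell list: consecutive pairs
def pairUp : List String → List (String × String)
  | left :: right :: rest => (left, right) :: pairUp rest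
  | _ => []

def build_options_layout_markup_py_alt (option_markup : List String) (option_texts : List String) : String :=
  if !(should_use_option_grid_py option_texts) then
    "\n        <div class=\"options-list\">\n          "
      ++ PySem.Str.join "" option_markup
      ++ "\n        </div>\n        "
  else
    let cells := option_markup.map
      (fun markup => "<div class=\"option-cell\">" ++ markup ++ "</div>")
    let cells := if cells.length % 2 == 1
      then cells ++ ["<div class=\"option-cell option-cell-empty\"></div>"]
      else cells
    let rows := PySem.Str.join "" ((pairUp cells).map
      (fun p => "\n            <div class=\"options-grid-row\">\n              "
                 ++ (p.1 ++ p.2)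
                 ++ "\n            </div>\n            "))
    "\n    <div class=\"options-list\">\n      "
      ++ rows
      ++ "\n    </div>\n    "

-- ===== PRECONDITION & SPEC =====
def Spec_build_options_layout_markup_py (option_markup : List String) (option_texts : List String) (out : String) : Prop := out = build_options_layout_markup_py_alt option_markup option_texts
instance (option_markup : List String) (option_texts : List String) (out : String) : Decidable (Spec_build_options_layout_markup_py option_markup option_texts out) := by unfold Spec_build_options_layout_markup_py; infer_instance

-- ===== CLAIM (what is proved, stated in full; the proofs are below) =====
def Claim_equal_build_options_layout_markup_py : Prop := ∀ (option_markup : List String) (option_texts : List String), Dom_build_options_layout_markup_py option_markup option_texts → Spec_build_options_layout_markup_py option_markup option_texts (build_options_layout_markup_py option_markup option_texts)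

-- ===== LEMMAS AND PROOFS =====

theorem join_empty_pair (x y : String) : PySem.Str.join "" [x, y] = x ++ y := by
  simp [PySem.Str.join, PySem.Chars.join, List.intercalate]

theorem pyRange_two_cons (a b : Int) (h : a < b) :
    PySem.List.pyRange a b 2 = a :: PySem.List.pyRange (a + 2) b 2 := by
  rw [PySem.List.pyRange_of_pos _ _ (by norm_num : (0:Int) < 2),
      PySem.List.pyRange_of_pos _ _ (by norm_num : (0:Int) < 2)]
  rw [if_pos h]
  have h2 : (if a + 2 < b then ((b - (a + 2) + 2 - 1) / 2).toNat else 0)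
      = ((b - (a + 2) + 2 - 1) / 2).toNat := by
    split_ifs with hc
    · rfl
    · omega
  rw [h2]
  have h1 : ((b - a + 2 - 1) / 2).toNat = ((b - (a + 2) + 2 - 1) / 2).toNat + 1 := by omega
  rw [h1, List.range_succ_eq_map]
  simp only [List.map_cons, List.map_map, Nat.cast_zero, mul_zero, add_zero]
  refine congrArg _ ?_
  apply List.map_congr_left
  intro k _
  simp [Function.comp]
  ring

theorem pyRange_two_nil (a b : Int) (h : b ≤ a) : PySem.List.pyRange a b 2 = [] := by
  rw [PySem.List.pyRange_of_pos _ _ (by norm_num : (0:Int) < 2), if_neg (by omega)]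
  simp

-- proof-side abbreviations for the row strings both ports build
def wrapCellS (m : String) : String := "<div class=\"option-cell\">" ++ m ++ "</div>"

def emptyCellS : String := "<div class=\"option-cell option-cell-empty\"></div>"

def rowS (x y : String) : String :=
  "\n            <div class=\"options-grid-row\">\n              "
    ++ (x ++ y) ++ "\n            </div>\n            "

-- the common reference: rows built two elements at a time
def rowsRec : List String → List String
  | [] => []
  | [a] => [rowS (wrapCellS a) emptyCellS]
  | a :: b :: rest => rowS (wrapCellS a) (wrapCellS b) :: rowsRec rest

theorem B_rows_eq (xs : List String) :
    ((pairUp (if (xs.map wrapCellS).length % 2 == 1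
        then xs.map wrapCellS ++ [emptyCellS]
        else xs.map wrapCellS)).map
      (fun p => "\n            <div class=\"options-grid-row\">\n              "
                 ++ (p.1 ++ p.2) ++ "\n            </div>\n            "))
    = rowsRec xs := by
  induction xs using rowsRec.induct with
  | case1 => simp [pairUp, rowsRec]
  | case2 a => simp [pairUp, rowsRec, rowS]
  | case3 a b rest ih =>
    have hcond : (((a :: b :: rest).map wrapCellS).length % 2 == 1)
        = ((rest.map wrapCellS).length % 2 == 1) := by
      simp only [List.map_cons, List.length_cons, List.length_map]
      congr 1
      omega
    rw [List.map_cons, List.map_cons] at hcond ⊢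
    rw [hcond]
    rw [show (wrapCellS a :: wrapCellS b :: List.map wrapCellS rest) ++ [emptyCellS]
        = wrapCellS a :: wrapCellS b :: (List.map wrapCellS rest ++ [emptyCellS]) from rfl]
    rw [← apply_ite (fun l => wrapCellS a :: wrapCellS b :: l)]
    rw [show ∀ l, pairUp (wrapCellS a :: wrapCellS b :: l) = (wrapCellS a, wrapCellS b) :: pairUp l
        from fun l => rfl]
    rw [List.map_cons, ih]
    simp [rowsRec, rowS]

theorem A_rows_eq (xs pre acc : List String) :
    (PySem.List.pyRange (pre.length : Int) ((pre.length : Int) + (xs.length : Int)) 2).foldl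
      (fun acc option_index =>
        acc ++ ["\n            <div class=\"options-grid-row\">\n              "
                 ++ PySem.Str.join ""
                     (if ((PySem.List.slice (pre ++ xs) (some option_index) (some (option_index + 2))).map
                            (fun cell_markup => "<div class=\"option-cell\">" ++ cell_markup ++ "</div>")).length == 1
                      then ((PySem.List.slice (pre ++ xs) (some option_index) (some (option_index + 2))).map
                            (fun cell_markup => "<div class=\"option-cell\">" ++ cell_markup ++ "</div>"))
                            ++ ["<div class=\"option-cell option-cell-empty\"></div>"]
                      else ((PySem.List.slice (pre ++ xs) (some option_index) (some (option_index + 2))).map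
                            (fun cell_markup => "<div class=\"option-cell\">" ++ cell_markup ++ "</div>")))
                 ++ "\n            </div>\n            "]) acc
    = acc ++ rowsRec xs := by
  induction xs using rowsRec.induct generalizing pre acc with
  | case1 =>
    rw [show ((pre.length : Int) + ((List.length ([] : List String)) : Int)) = (pre.length : Int) by simp]
    rw [pyRange_two_nil _ _ le_rfl]
    simp [rowsRec]
  | case2 a =>
    have h1 : PySem.List.pyRange (pre.length : Int) ((pre.length : Int) + (([a] : List String).length : Int)) 2
        = [(pre.length : Int)] := by
      rw [pyRange_two_cons _ _ (by simp only [List.length_singleton]; push_cast; omega), pyRange_two_nil _ _ (by simp only [List.length_singleton]; push_cast; omega)]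
    rw [h1]
    have hs : PySem.List.slice (pre ++ [a]) (some (pre.length : Int)) (some ((pre.length : Int) + 2))
        = [a] := by
      rw [show ((pre.length : Int) + 2) = ((pre.length : Int) + ((2 : Nat) : Int)) by push_cast; ring]
      rw [PySem.List.slice_natCast_add]
      simp
    simp only [List.foldl_cons, List.foldl_nil, hs]
    simp [rowsRec, rowS, wrapCellS, emptyCellS, join_empty_pair]
  | case3 a b rest ih =>
    have h1 : PySem.List.pyRange (pre.length : Int) ((pre.length : Int) + ((a :: b :: rest).length : Int)) 2
        = (pre.length : Int) :: PySem.List.pyRange ((pre.length : Int) + 2) ((pre.length : Int) + ((a :: b :: rest).length : Int)) 2 := by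
      rw [pyRange_two_cons _ _ (by simp only [List.length_cons]; push_cast; omega)]
    rw [h1]
    have hs : PySem.List.slice (pre ++ (a :: b :: rest)) (some (pre.length : Int)) (some ((pre.length : Int) + 2))
        = [a, b] := by
      rw [show ((pre.length : Int) + 2) = ((pre.length : Int) + ((2 : Nat) : Int)) by push_cast; ring]
      rw [PySem.List.slice_natCast_add]
      simp [List.take_succ_cons]
    simp only [List.foldl_cons, hs]
    have harith : ((pre.length : Int) + 2) = (((pre ++ [a, b]).length : Nat) : Int) := by
      simp
    have harith2 : ((pre.length : Int) + ((a :: b :: rest).length : Int))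
        = (((pre ++ [a, b]).length : Nat) : Int) + ((rest.length : Nat) : Int) := by
      push_cast [List.length_append, List.length_cons, List.length_nil]; ring
    have hlist : pre ++ (a :: b :: rest) = (pre ++ [a, b]) ++ rest := by simp
    rw [harith, harith2, hlist, ih]
    simp [rowsRec, rowS, wrapCellS, join_empty_pair, List.append_assoc]

theorem ports_agree (option_markup option_texts : List String) :
    build_options_layout_markup_py option_markup option_texts
    = build_options_layout_markup_py_alt option_markup option_texts := by
  unfold build_options_layout_markup_py build_options_layout_markup_py_alt
  cases h : should_use_option_grid_py option_texts with
  | false => simp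
  | true =>
    simp only [Bool.not_true, Bool.false_eq_true, if_false]
    refine congrArg (fun r => _ ++ PySem.Str.join "" r ++ _) ?_
    have hA := A_rows_eq option_markup [] []
    simp only [List.length_nil, Nat.cast_zero, List.nil_append, zero_add] at hA
    have hB := B_rows_eq option_markup
    simp only [emptyCellS] at hB
    rw [← hB] at hA
    exact hA

-- ===== VERDICT (by name: the statement is the Claim_ definition above) =====
theorem build_options_layout_markup_py_spec : Claim_equal_build_options_layout_markup_py := by
  intro option_markup option_texts _
  unfold Spec_build_options_layout_markup_py
  exact ports_agree option_markup option_texts
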